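-- pv_equiv track=rewrite | github.com/wufangjie/graph | data/testing_graph_plot.py | calc_x_y_max
-- ===== SOURCE A (Python) =====
-- def calc_x_y_max(v_lst):
--     xmax, ymax = 0, 0
--     for x, y in v_lst:
--         if x > xmax:
--             xmax = x
--         if y > ymax:
--             ymax = y
--     xmax += 1
--     ymax += 1
--     return xmax, ymax
-- ===== SOURCE B (Python) =====
-- def calc_x_y_max(v_lst):
--     xs = sorted([0, *(x for x, y in v_lst)])
--     ys = sorted([0, *(y for x, y in v_lst)])
--     return xs[-1] + 1, ys[-1] + 1
-- ===== Notes on version B (the rewrite author's own statement) =====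
-- stated objective: alternative
-- what changed: Replaces the single running-max loop with a sort-based approach: sort each coordinate list (with 0 prepended as the floor) and take the last element, then add 1.
import Mathlib
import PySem

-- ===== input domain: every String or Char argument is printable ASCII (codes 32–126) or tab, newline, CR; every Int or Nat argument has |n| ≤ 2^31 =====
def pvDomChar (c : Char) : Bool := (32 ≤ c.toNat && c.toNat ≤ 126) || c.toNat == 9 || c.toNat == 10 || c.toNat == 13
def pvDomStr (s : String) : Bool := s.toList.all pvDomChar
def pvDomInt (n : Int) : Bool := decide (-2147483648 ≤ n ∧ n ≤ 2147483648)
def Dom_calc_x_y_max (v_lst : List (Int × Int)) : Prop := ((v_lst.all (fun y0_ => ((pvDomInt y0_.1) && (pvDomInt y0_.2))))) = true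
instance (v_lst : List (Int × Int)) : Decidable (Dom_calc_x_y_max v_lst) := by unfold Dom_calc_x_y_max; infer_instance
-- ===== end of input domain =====

-- B replaces A's single running-max loop by a sort-based algorithm: sort each coordinate
-- list with 0 prepended and read off the last element (alternative; same result).

-- ===== PORT A =====
-- one loop with two running maxima, then +1 on each
def calc_x_y_max (v_lst : List (Int × Int)) : Int × Int :=
  let s := v_lst.foldl
    (fun (st : Int × Int) (p : Int × Int) =>
      (if p.1 > st.1 then p.1 else st.1, if p.2 > st.2 then p.2 else st.2))
    (0, 0)
  (s.1 + 1, s.2 + 1)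

-- ===== PORT B =====
-- sorted([0, *coords]) then [-1]: the sorted list is nonempty (0 is in it), so the
-- -1 index is always in range; pyGetD with default 0 is exact here.
def calc_x_y_max_alt (v_lst : List (Int × Int)) : Int × Int :=
  let xs := PySem.List.sorted (0 :: v_lst.map (fun p => p.1)) (fun x => x) false
  let ys := PySem.List.sorted (0 :: v_lst.map (fun p => p.2)) (fun x => x) false
  (PySem.List.pyGetD xs (-1) 0 + 1, PySem.List.pyGetD ys (-1) 0 + 1)

-- ===== PRECONDITION & SPEC =====
def Spec_calc_x_y_max (v_lst : List (Int × Int)) (out : Int × Int) : Prop := out = calc_x_y_max_alt v_lst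
instance (v_lst : List (Int × Int)) (out : Int × Int) : Decidable (Spec_calc_x_y_max v_lst out) := by unfold Spec_calc_x_y_max; infer_instance

-- ===== CLAIM (what is proved, stated in full; the proofs are below) =====
def Claim_equal_calc_x_y_max : Prop := ∀ (v_lst : List (Int × Int)), Dom_calc_x_y_max v_lst → Spec_calc_x_y_max v_lst (calc_x_y_max v_lst)

-- ===== LEMMAS AND PROOFS =====
-- A's combined fold splits into the two running maxima of the projections
theorem calc_fold_pair (v_lst : List (Int × Int)) (a b : Int) :
    v_lst.foldl
      (fun (st : Int × Int) (p : Int × Int) =>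
        (if p.1 > st.1 then p.1 else st.1, if p.2 > st.2 then p.2 else st.2))
      (a, b)
    = ((v_lst.map (fun p => p.1)).foldl max a,
       (v_lst.map (fun p => p.2)).foldl max b) := by
  induction v_lst generalizing a b with
  | nil => rfl
  | cons h t ih =>
    simp only [List.foldl, List.map]
    rw [ih]
    have hx : (if h.1 > a then h.1 else a) = max a h.1 := by simp [max_def]; omega
    have hy : (if h.2 > b then h.2 else b) = max b h.2 := by simp [max_def]; omega
    rw [hx, hy]

-- the last element of sorted(0 :: l) is the running max foldl max 0 l
theorem last_sorted_eq_foldl_max (l : List Int) :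
    PySem.List.pyGetD (PySem.List.sorted (0 :: l) (fun x => x) false) (-1) 0
      = l.foldl max 0 := by
  set s := PySem.List.sorted (0 :: l) (fun x => x) false with hs
  have hne : s ≠ [] := by
    intro h
    have := (PySem.List.sorted_eq_nil_iff (xs := 0 :: l) (key := fun x => x) (rev := false)).mp (hs ▸ h)
    simp at this
  rw [PySem.List.pyGetD_neg_one (xs := s) (d := 0) hne]
  have hperm : s.Perm (0 :: l) := PySem.List.sorted_perm _ _ _
  have hpw : s.Pairwise (fun a b => (a : Int) ≤ b) := PySem.List.sorted_pairwise _ _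
  -- the last element of s is ≥ every element of s
  have hlast_mem : s.getLast hne ∈ s := List.getLast_mem hne
  have hge : ∀ y ∈ s, y ≤ s.getLast hne := by
    intro y hy
    rcases List.getElem_of_mem hy with ⟨i, hi, rfl⟩
    rw [List.getLast_eq_getElem]
    exact PySem.List.sorted_id_getElem_mono (xs := 0 :: l) (p := i) (q := s.length - 1)
      (by omega) (by simpa only [hs] using Nat.sub_lt (List.length_pos_of_ne_nil hne) one_pos)
  -- foldl max 0 l is the max of 0 :: l
  have hfm := PySem.List.le_foldl_max l 0
  have hmem : l.foldl max 0 ∈ (0 :: l) := by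
    rcases PySem.List.foldl_max_mem l 0 with h | h
    · simp [h]
    · simp [h]
  have h1 : s.getLast hne ≤ l.foldl max 0 := by
    have : s.getLast hne ∈ (0 :: l) := hperm.mem_iff.mp hlast_mem
    rcases List.mem_cons.mp this with h | h
    · rw [h]; exact hfm.1
    · exact hfm.2 _ h
  have h2 : l.foldl max 0 ≤ s.getLast hne :=
    hge _ (hperm.mem_iff.mpr hmem)
  omega

-- ===== VERDICT (by name: the statement is the Claim_ definition above) =====
theorem calc_x_y_max_spec : Claim_equal_calc_x_y_max := by
  intro v _
  unfold Spec_calc_x_y_max calc_x_y_max calc_x_y_max_alt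
  simp only [calc_fold_pair, last_sorted_eq_foldl_max]
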